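-- pv_equiv track=rewrite | github.com/PringlesBitch/slevy | scraper.py | _prioritize_urls
-- ===== SOURCE A (Python) =====
-- def _prioritize_urls(urls: list[str]) -> list[str]:
--     """Seřadí URL tak, aby nahoře byly ty s větší pravděpodobností slevy."""
--     sale_signals = ["sleva", "akce", "vyprodej", "sale", "discount", "outlet", "zlevneno"]
--     priority = []
--     rest = []
--     for u in urls:
--         if any(s in u.lower() for s in sale_signals):
--             priority.append(u)
--         else:
--             rest.append(u)
--     return priority + rest
-- ===== SOURCE B (Python) =====
-- def _prioritize_urls(urls: list[str]) -> list[str]: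
--     """Seřadí URL tak, aby nahoře byly ty s větší pravděpodobností slevy."""
--     sale_signals = ["sleva", "akce", "vyprodej", "sale", "discount", "outlet", "zlevneno"]
--     return sorted(urls, key=lambda u: 0 if any(s in u.lower() for s in sale_signals) else 1)
-- ===== Notes on version B (the rewrite author's own statement) =====
-- stated objective: idiomatic
-- what changed: Replaced the two-accumulator partition loop with a single stable sort keyed by a binary 0/1 sale-signal priority; stability preserves the original relative order within each group.
import Mathlib
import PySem

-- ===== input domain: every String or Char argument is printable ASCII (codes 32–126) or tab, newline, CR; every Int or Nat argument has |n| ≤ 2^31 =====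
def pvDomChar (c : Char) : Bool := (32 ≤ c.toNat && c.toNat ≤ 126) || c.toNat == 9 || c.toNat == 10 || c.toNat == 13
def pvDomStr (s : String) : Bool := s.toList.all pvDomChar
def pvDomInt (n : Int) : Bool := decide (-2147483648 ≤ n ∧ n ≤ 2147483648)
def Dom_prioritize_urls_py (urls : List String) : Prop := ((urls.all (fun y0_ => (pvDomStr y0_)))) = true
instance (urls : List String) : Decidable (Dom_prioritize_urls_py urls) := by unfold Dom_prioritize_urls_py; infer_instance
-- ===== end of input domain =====

-- B replaces A's two-accumulator partition loop by one stable sort with a binary 0/1 sale-signal key (idiomatic, same result).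


-- shared one-liner for the sale-signal test 'any(s in u.lower() for s in sale_signals)' (identical in both Pythons)
def saleSignals : List String := ["sleva", "akce", "vyprodej", "sale", "discount", "outlet", "zlevneno"]

def hasSaleSignal (u : String) : Bool := saleSignals.any (fun s => PySem.Str.isIn s (PySem.Str.lower u))

-- ===== PORT A =====
-- the for-loop appending to 'priority'/'rest', then 'priority + rest'
def prioritize_urls_py (urls : List String) : List String :=
  let pr := urls.foldl
    (fun (acc : List String × List String) u =>
      if hasSaleSignal u then (acc.1 ++ [u], acc.2) else (acc.1, acc.2 ++ [u]))
    ([], [])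
  pr.1 ++ pr.2

-- ===== PORT B =====
-- sorted(urls, key=lambda u: 0 if <signal> else 1)  (stable sort, binary key)
def prioritize_urls_py_alt (urls : List String) : List String :=
  PySem.List.sorted urls (fun u => if hasSaleSignal u then (0 : Int) else 1) false

-- ===== PRECONDITION & SPEC =====
def Spec_prioritize_urls_py (urls : List String) (out : List String) : Prop := out = prioritize_urls_py_alt urls
instance (urls : List String) (out : List String) : Decidable (Spec_prioritize_urls_py urls out) := by unfold Spec_prioritize_urls_py; infer_instance

-- ===== CLAIM (what is proved, stated in full; the proofs are below) =====
def Claim_equal_prioritize_urls_py : Prop := ∀ (urls : List String), Dom_prioritize_urls_py urls → Spec_prioritize_urls_py urls (prioritize_urls_py urls)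

-- ===== LEMMAS AND PROOFS =====

-- the 'before' comparator induced by the binary key is exactly "x is a signal and y is not"
lemma key_before (c : String → Bool) :
    (fun a b => decide ((if c a then (0 : Int) else 1) < (if c b then (0 : Int) else 1)))
      = (fun a b => c a && !c b) := by
  funext a b
  by_cases ha : c a <;> by_cases hb : c b <;> simp [ha, hb]

-- inserting a signal element into a partitioned accumulator puts it right after the signal block
lemma insertBy_partition (c : String → Bool) (x : String) (P R : List String)
    (hx : c x = true) (hP : ∀ y ∈ P, c y = true) (hR : ∀ y ∈ R, c y = false) :
    PySem.List.insertBy (fun a b => c a && !c b) x (P ++ R) = P ++ x :: R := by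
  induction P with
  | nil =>
    cases R with
    | nil => simp [PySem.List.insertBy]
    | cons r rs =>
      have hr : c r = false := hR r (by simp)
      simp [PySem.List.insertBy, hx, hr]
  | cons p ps ih =>
    have hp : c p = true := hP p (by simp)
    simp only [List.cons_append, PySem.List.insertBy, hp, Bool.not_true, Bool.and_false,
      Bool.false_eq_true, if_false]
    exact congrArg (p :: ·) (ih (fun y hy => hP y (by simp [hy])) )

-- the insertion-sort fold over a partitioned accumulator stays a partition (B's side)
lemma foldl_insert_partition (c : String → Bool) :
    ∀ (xs P R : List String), (∀ y ∈ P, c y = true) → (∀ y ∈ R, c y = false) →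
    xs.foldl (fun acc x => PySem.List.insertBy (fun a b => c a && !c b) x acc) (P ++ R)
      = (P ++ xs.filter c) ++ (R ++ xs.filter (fun y => !c y)) := by
  intro xs
  induction xs with
  | nil => intro P R _ _; simp
  | cons x xs ih =>
    intro P R hP hR
    by_cases hx : c x = true
    · have hP' : ∀ y ∈ P ++ [x], c y = true := by
        intro y hy
        rcases List.mem_append.1 hy with h | h
        · exact hP y h
        · simp at h; rw [h]; exact hx
      have hins : PySem.List.insertBy (fun a b => c a && !c b) x (P ++ R) = (P ++ [x]) ++ R := by
        rw [insertBy_partition c x P R hx hP hR]; simp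
      simp only [List.foldl_cons, hins]
      rw [ih (P ++ [x]) R hP' hR]
      simp [hx]
    · have hx' : c x = false := by simpa using hx
      have hR' : ∀ y ∈ R ++ [x], c y = false := by
        intro y hy
        rcases List.mem_append.1 hy with h | h
        · exact hR y h
        · simp at h; rw [h]; exact hx'
      have hins : PySem.List.insertBy (fun a b => c a && !c b) x (P ++ R) = P ++ (R ++ [x]) := by
        rw [PySem.List.insertBy_of_forall_not_before _ x (P ++ R)
          (by intro y hy; simp [hx'])]
        simp
      simp only [List.foldl_cons, hins]
      rw [ih P (R ++ [x]) hP hR']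
      simp [hx']

-- A's two-accumulator loop computes the two filters (A's side)
lemma foldl_partition (c : String → Bool) :
    ∀ (xs : List String) (p r : List String),
    xs.foldl (fun (acc : List String × List String) u =>
        if c u then (acc.1 ++ [u], acc.2) else (acc.1, acc.2 ++ [u])) (p, r)
      = (p ++ xs.filter c, r ++ xs.filter (fun y => !c y)) := by
  intro xs
  induction xs with
  | nil => intro p r; simp
  | cons x xs ih =>
    intro p r
    by_cases hx : c x = true
    · simp [List.foldl_cons, hx, ih]
    · have hx' : c x = false := by simpa using hx
      simp [List.foldl_cons, hx', ih]

-- ===== VERDICT (by name: the statement is the Claim_ definition above) =====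
theorem prioritize_urls_py_spec : Claim_equal_prioritize_urls_py := by
  intro urls _
  unfold Spec_prioritize_urls_py prioritize_urls_py prioritize_urls_py_alt
  rw [PySem.List.sorted]
  simp only [if_neg (by decide : ¬ (false = true))]
  rw [key_before hasSaleSignal]
  have hB := foldl_insert_partition hasSaleSignal urls [] []
    (by intro y h; cases h) (by intro y h; cases h)
  simp only [List.nil_append] at hB
  rw [hB, foldl_partition hasSaleSignal urls [] []]
  simp
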